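-- pv_equiv track=rewrite | github.com/Noquela/Sands-of-Duat | art_pipeline/quality_assurance/process_generated_assets.py | determine_rarity_from_filename
-- ===== SOURCE A (Python) =====
-- def determine_rarity_from_filename(filename: str) -> str:
--     """Extract rarity from filename"""
--     filename_lower = filename.lower()
--
--     if "legendary" in filename_lower:
--         return "legendary"
--     elif "epic" in filename_lower:
--         return "epic"
--     elif "rare" in filename_lower:
--         return "rare"
--     elif "common" in filename_lower:
--         return "common"
--     else:
--         # Default fallback based on content keywords
--         if any(deity in filename_lower for deity in ["anubis", "ra", "isis", "set", "thoth"]):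
--             return "legendary"
--         elif any(hero in filename_lower for hero in ["warrior", "hero", "pharaoh"]):
--             return "epic"
--         elif any(creature in filename_lower for creature in ["sphinx", "mummy", "scarab"]):
--             return "rare"
--         else:
--             return "rare"  # Default
-- ===== SOURCE B (Python) =====
-- # Rank-minimisation instead of a cascade: score every matched keyword by its
-- # priority rank and return the rarity of the best (minimal) rank found.
-- KEYWORD_RANK = {
--     "legendary": 0, "epic": 1, "rare": 2, "common": 3,
--     "anubis": 4, "ra": 4, "isis": 4, "set": 4, "thoth": 4,
--     "warrior": 5, "hero": 5, "pharaoh": 5,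
--     "sphinx": 6, "mummy": 6, "scarab": 6,
-- }
-- RANK_RARITY = ["legendary", "epic", "rare", "common", "legendary", "epic", "rare", "rare"]
--
-- def determine_rarity_from_filename(filename: str) -> str:
--     """Extract rarity from filename: min priority rank over all matched keywords."""
--     lower = filename.lower()
--     best = min((rank for kw, rank in KEYWORD_RANK.items() if kw in lower), default=7)
--     return RANK_RARITY[best]
-- ===== Notes on version B (the rewrite author's own statement) =====
-- stated objective: alternative
-- what changed: Replaced A's two nested if/elif cascades by a rank-minimisation: every keyword carries a priority rank, B takes the minimum rank over all keywords found in the lowercased filename (default 7) and maps that rank to a rarity via a lookup list.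
import Mathlib
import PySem

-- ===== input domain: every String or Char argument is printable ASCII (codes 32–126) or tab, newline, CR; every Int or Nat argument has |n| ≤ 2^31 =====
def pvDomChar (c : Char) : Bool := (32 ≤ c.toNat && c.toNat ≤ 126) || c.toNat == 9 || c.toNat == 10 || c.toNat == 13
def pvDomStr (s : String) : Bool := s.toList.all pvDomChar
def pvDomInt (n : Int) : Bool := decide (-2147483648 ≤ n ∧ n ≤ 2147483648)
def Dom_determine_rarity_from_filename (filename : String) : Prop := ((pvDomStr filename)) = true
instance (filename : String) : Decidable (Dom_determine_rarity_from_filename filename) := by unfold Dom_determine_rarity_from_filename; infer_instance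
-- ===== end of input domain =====

-- B replaces A's nested if/elif cascades with a per-keyword priority-rank minimisation plus a rank→rarity lookup (alternative decomposition, same cost).


-- ===== PORT A =====
def determine_rarity_from_filename (filename : String) : String :=
  let filename_lower := PySem.Str.lower filename
  if PySem.Str.isIn "legendary" filename_lower then "legendary"
  else if PySem.Str.isIn "epic" filename_lower then "epic"
  else if PySem.Str.isIn "rare" filename_lower then "rare"
  else if PySem.Str.isIn "common" filename_lower then "common"
  else
    if (["anubis", "ra", "isis", "set", "thoth"] : List String).any
        (fun deity => PySem.Str.isIn deity filename_lower) then "legendary"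
    else if (["warrior", "hero", "pharaoh"] : List String).any
        (fun hero => PySem.Str.isIn hero filename_lower) then "epic"
    else if (["sphinx", "mummy", "scarab"] : List String).any
        (fun creature => PySem.Str.isIn creature filename_lower) then "rare"
    else "rare"

-- ===== PORT B =====
-- B: min priority rank over all matched keywords, then a rank -> rarity lookup.
def KEYWORD_RANK : List (String × Nat) :=
  [("legendary", 0), ("epic", 1), ("rare", 2), ("common", 3),
   ("anubis", 4), ("ra", 4), ("isis", 4), ("set", 4), ("thoth", 4),
   ("warrior", 5), ("hero", 5), ("pharaoh", 5),
   ("sphinx", 6), ("mummy", 6), ("scarab", 6)]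

def RANK_RARITY : List String :=
  ["legendary", "epic", "rare", "common", "legendary", "epic", "rare", "rare"]

def determine_rarity_from_filename_alt (filename : String) : String :=
  let lower := PySem.Str.lower filename
  -- the generator '(rank for kw, rank in KEYWORD_RANK.items() if kw in lower)'
  let ranks := (KEYWORD_RANK.filter (fun p => PySem.Str.isIn p.1 lower)).map (fun p => p.2)
  -- min(..., default=7)
  let best := (PySem.List.min? ranks (fun r => r)).getD 7
  -- RANK_RARITY[best]: best ≤ 7 always, so the index is always in range
  RANK_RARITY.getD best "rare"

-- ===== PRECONDITION & SPEC =====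
def Spec_determine_rarity_from_filename (filename : String) (out : String) : Prop := out = determine_rarity_from_filename_alt filename
instance (filename : String) (out : String) : Decidable (Spec_determine_rarity_from_filename filename out) := by unfold Spec_determine_rarity_from_filename; infer_instance

-- ===== CLAIM (what is proved, stated in full; the proofs are below) =====
def Claim_equal_determine_rarity_from_filename : Prop := ∀ (filename : String), Dom_determine_rarity_from_filename filename → Spec_determine_rarity_from_filename filename (determine_rarity_from_filename filename)

-- ===== LEMMAS AND PROOFS =====

theorem foldl_min_of_le (t : List Nat) (x : Nat) (h : ∀ y ∈ t, x ≤ y) :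
    t.foldl min x = x := by
  induction t generalizing x with
  | nil => rfl
  | cons y t ih =>
      have hxy : min x y = x := Nat.min_eq_left (h y (by simp))
      simp only [List.foldl_cons, hxy]
      exact ih x (fun z hz => h z (by simp [hz]))

theorem min?_id_sorted (l : List Nat) (h : l.Pairwise (· ≤ ·)) :
    PySem.List.min? l (fun r => r) = l.head? := by
  cases l with
  | nil => simp [PySem.List.min?]
  | cons x t =>
      rw [PySem.List.min?_id_cons]
      simp only [List.head?_cons, Option.some.injEq]
      exact foldl_min_of_le t x (fun y hy => (List.pairwise_cons.mp h).1 y hy)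

set_option maxHeartbeats 1000000 in
-- ===== VERDICT (by name: the statement is the Claim_ definition above) =====
theorem determine_rarity_from_filename_spec : Claim_equal_determine_rarity_from_filename := by
  intro filename _
  unfold Spec_determine_rarity_from_filename determine_rarity_from_filename
    determine_rarity_from_filename_alt
  have hpw : ((KEYWORD_RANK.filter
      (fun p => PySem.Str.isIn p.1 (PySem.Str.lower filename))).map (fun p => p.2)).Pairwise
      (· ≤ ·) := by
    refine List.Pairwise.sublist (List.Sublist.map _ List.filter_sublist) ?_
    unfold KEYWORD_RANK
    decide
  dsimp only
  rw [min?_id_sorted _ hpw]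
  unfold KEYWORD_RANK RANK_RARITY
  simp only [List.filter, List.any_cons, List.any_nil, Bool.or_false]
  generalize PySem.Str.isIn "legendary" (PySem.Str.lower filename) = b0
  generalize PySem.Str.isIn "epic" (PySem.Str.lower filename) = b1
  generalize PySem.Str.isIn "rare" (PySem.Str.lower filename) = b2
  generalize PySem.Str.isIn "common" (PySem.Str.lower filename) = b3
  generalize PySem.Str.isIn "anubis" (PySem.Str.lower filename) = b4
  generalize PySem.Str.isIn "ra" (PySem.Str.lower filename) = b5
  generalize PySem.Str.isIn "isis" (PySem.Str.lower filename) = b6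
  generalize PySem.Str.isIn "set" (PySem.Str.lower filename) = b7
  generalize PySem.Str.isIn "thoth" (PySem.Str.lower filename) = b8
  generalize PySem.Str.isIn "warrior" (PySem.Str.lower filename) = b9
  generalize PySem.Str.isIn "hero" (PySem.Str.lower filename) = b10
  generalize PySem.Str.isIn "pharaoh" (PySem.Str.lower filename) = b11
  generalize PySem.Str.isIn "sphinx" (PySem.Str.lower filename) = b12
  generalize PySem.Str.isIn "mummy" (PySem.Str.lower filename) = b13
  generalize PySem.Str.isIn "scarab" (PySem.Str.lower filename) = b14
  cases b0 with
  | true => simp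
  | false =>
    cases b1 with
    | true => simp
    | false =>
      cases b2 with
      | true => simp
      | false =>
        cases b3 with
        | true => simp
        | false =>
          cases b4 with
          | true => simp
          | false =>
            cases b5 with
            | true => simp
            | false =>
              cases b6 with
              | true => simp
              | false =>
                cases b7 with
                | true => simp
                | false =>
                  cases b8 with
                  | true => simp
                  | false =>
                    cases b9 with
                    | true => simp
                    | false =>
                      cases b10 with
                      | true => simp
                      | false =>
                        cases b11 with
                        | true => simp
                        | false =>
                          cases b12 with
                          | true => simp
                          | false =>
                            cases b13 with
                            | true => simp
                            | false =>
                              cases b14 with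
                              | true => simp
                              | false => simp
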